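-- pv_equiv track=rewrite | github.com/RuanKang/learn_github | rename_variables_in_algorithm.py | f
-- ===== SOURCE A (Python) =====
-- def f(total, number_of_sections):
--     if number_of_sections == 0:
--         return 1
--     if number_of_sections > 0:
--         id_of_subproblem = 1
--         sub_total = total - 1
--         c = 0
--         while sub_total != 0:
--             c += f(sub_total, number_of_sections - 1)
--             id_of_subproblem += 1
--             sub_total -= 1
--         return c
-- ===== SOURCE B (Python) =====
-- def f(total, number_of_sections):
--     if number_of_sections == 0:
--         return 1
--     n = total - 1
--     k = number_of_sections
--     if k > n:
--         return 0
--     r = 1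
--     for i in range(k):
--         r = r * (n - i) // (i + 1)
--     return r
-- ===== Notes on version B (the rewrite author's own statement) =====
-- stated objective: faster
-- what changed: A's value is the binomial coefficient C(total-1, number_of_sections); B computes it directly with a single multiplicative product loop instead of A's exponential recursive summation.
-- outside the precondition, e.g. on f(5, -1): A returns None, B returns 1; on f(0, 1): A does not finish within the time limit, B returns 0
import Mathlib
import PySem

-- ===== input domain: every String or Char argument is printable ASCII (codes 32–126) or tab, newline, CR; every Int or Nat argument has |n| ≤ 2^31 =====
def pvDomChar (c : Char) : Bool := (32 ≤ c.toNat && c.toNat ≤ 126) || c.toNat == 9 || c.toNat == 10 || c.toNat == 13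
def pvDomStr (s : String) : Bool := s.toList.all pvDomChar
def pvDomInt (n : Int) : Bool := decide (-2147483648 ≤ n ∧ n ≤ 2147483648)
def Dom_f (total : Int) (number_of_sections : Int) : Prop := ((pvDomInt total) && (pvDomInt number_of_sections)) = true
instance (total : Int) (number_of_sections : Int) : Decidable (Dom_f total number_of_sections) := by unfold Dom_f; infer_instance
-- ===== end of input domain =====

-- B replaces A's exponential recursive summation by a single O(k) multiplicative
-- product loop computing the same value, the binomial coefficient C(total-1, k).

-- ===== PORT A =====
-- A's while loop: sub_total runs total-1, total-2, …, 1 (on Pre_f total ≥ 1, so the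
-- countdown over the Nat (total-1).toNat is exact), accumulating c += f(sub_total, k-1).
def fAloop (g : Int → Int) : Nat → Int → Int
  | 0, c => c
  | s+1, c => fAloop g s (c + g ((s : Int) + 1))

-- A's recursion on number_of_sections (a Nat here: Pre_f gives 0 ≤ number_of_sections)
def fA : Nat → Int → Int
  | 0, _ => 1
  | k+1, total => fAloop (fA k) ((total - 1).toNat) 0

def f (total : Int) (number_of_sections : Int) : Int :=
  if number_of_sections = 0 then 1
  else if number_of_sections > 0 then fA number_of_sections.toNat total
  else 0  -- A falls off the end and returns None here: excluded by Pre_f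

-- ===== PORT B =====
def f_alt (total : Int) (number_of_sections : Int) : Int :=
  if number_of_sections = 0 then 1
  else
    let n := total - 1
    let k := number_of_sections
    if k > n then 0
    else (PySem.List.pyRange 0 k 1).foldl
      (fun r i => PySem.Int.floordiv (r * (n - i)) (i + 1)) 1

-- ===== PRECONDITION & SPEC =====
-- Pre_f excludes number_of_sections < 0 (A falls off the end and returns None, not an
-- int), total ≤ 0 with number_of_sections > 0 (A's while loop never terminates), and
-- inputs where A's recursion depth min(total-1, number_of_sections) exceeds Python's
-- recursion limit, on which A raises RecursionError (the bound 900 is safely below it).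
def Pre_f (total : Int) (number_of_sections : Int) : Prop :=
  0 ≤ number_of_sections ∧ (number_of_sections = 0 ∨ 1 ≤ total) ∧
    (total - 1 ≤ 900 ∨ number_of_sections ≤ 900)
instance (total : Int) (number_of_sections : Int) : Decidable (Pre_f total number_of_sections) := by unfold Pre_f; infer_instance

def pvWitness_f : Int × Int := (5, 2)

def Spec_f (total : Int) (number_of_sections : Int) (out : Int) : Prop := out = f_alt total number_of_sections
instance (total : Int) (number_of_sections : Int) (out : Int) : Decidable (Spec_f total number_of_sections out) := by unfold Spec_f; infer_instance

-- ===== CLAIM (what is proved, stated in full; the proofs are below) =====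
def Claim_equal_f : Prop := ∀ (total : Int) (number_of_sections : Int), Dom_f total number_of_sections → Pre_f total number_of_sections → Spec_f total number_of_sections (f total number_of_sections)

-- ===== LEMMAS AND PROOFS =====

-- A's inner loop sums C(s-1, k) for s = 1..s0, the hockey-stick identity.
theorem fAloop_val (k : Nat) (hfk : ∀ t : Nat, fA k ((t : Int) + 1) = (t.choose k : Int)) :
    ∀ (s : Nat) (c : Int), fAloop (fA k) s c = c + ((s.choose (k+1) : Nat) : Int) := by
  intro s
  induction s with
  | zero => intro c; simp [fAloop]
  | succ s ih =>
    intro c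
    have h1 : fAloop (fA k) (s+1) c = fAloop (fA k) s (c + fA k ((s : Int) + 1)) := rfl
    rw [h1, ih, hfk s]
    have h2 : (s+1).choose (k+1) = s.choose k + s.choose (k+1) := Nat.choose_succ_succ s k
    rw [h2]
    push_cast
    ring

theorem fA_val : ∀ (k t : Nat), fA k ((t : Int) + 1) = (t.choose k : Int) := by
  intro k
  induction k with
  | zero => intro t; simp [fA]
  | succ k ih =>
    intro t
    have h0 : (((t : Int) + 1 - 1).toNat) = t := by omega
    have h1 : fA (k+1) ((t : Int) + 1) = fAloop (fA k) t 0 := by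
      simp only [fA, h0]
    rw [h1, fAloop_val k ih t 0]
    simp

-- B's product loop computes C(n, k) exactly: each step's division is exact by
-- Nat.choose_succ_right_eq.
theorem loop_val (n : Nat) : ∀ (k : Nat), k ≤ n →
    (PySem.List.pyRange 0 (k : Int) 1).foldl
      (fun r i => PySem.Int.floordiv (r * ((n : Int) - i)) (i + 1)) 1 = (n.choose k : Int) := by
  intro k
  induction k with
  | zero =>
    intro _
    rw [PySem.List.pyRange_one_eq_nil (by omega)]
    simp
  | succ k ih =>
    intro hkn
    have hk : (((k+1 : Nat)) : Int) = (k : Int) + 1 := by push_cast; ring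
    rw [hk, PySem.List.pyRange_one_succ_right (by positivity), List.foldl_append,
        ih (by omega)]
    simp only [List.foldl_cons, List.foldl_nil]
    have hlt : k < n := by omega
    have hsub : (n : Int) - (k : Int) = ((n - k : Nat) : Int) := by omega
    rw [hsub]
    have hnat : n.choose k * (n - k) = n.choose (k+1) * (k+1) :=
      (Nat.choose_succ_right_eq n k).symm
    have hmul : ((n.choose k : Nat) : Int) * ((n - k : Nat) : Int)
        = ((n.choose (k+1) * (k+1) : Nat) : Int) := by
      rw [← hnat]; push_cast; ring
    rw [hmul]
    have hdiv : ((k : Int) + 1) = (((k+1 : Nat)) : Int) := by push_cast; ring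
    rw [hdiv, PySem.Int.floordiv_natCast]
    norm_num

-- ===== VERDICT (by name: the statement is the Claim_ definition above) =====
theorem f_spec : Claim_equal_f := by
  intro total k _ hPre
  obtain ⟨hk0, hor, _⟩ := hPre
  unfold Spec_f
  by_cases hz : k = 0
  · simp [f, f_alt, hz]
  · have hkpos : 0 < k := lt_of_le_of_ne hk0 (Ne.symm hz)
    have htot : 1 ≤ total := by
      rcases hor with h | h
      · exact absurd h hz
      · exact h
    set t : Nat := (total - 1).toNat with ht
    have htot' : total = (t : Int) + 1 := by omega
    set kk : Nat := k.toNat with hkk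
    have hkk' : k = (kk : Int) := by omega
    have hA : f total k = (t.choose kk : Int) := by
      rw [f, if_neg hz, if_pos hkpos, htot', fA_val]
    rw [hA, f_alt, if_neg hz]
    simp only []
    by_cases hgt : k > total - 1
    · rw [if_pos hgt]
      have : t < kk := by omega
      rw [Nat.choose_eq_zero_of_lt this]
      simp
    · rw [if_neg hgt]
      have hle : kk ≤ t := by omega
      have hn1 : total - 1 = (t : Int) := by omega
      rw [hn1, hkk', loop_val t kk hle]
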